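-- pv_equiv track=rewrite | github.com/z-Zoey/data-structure-python | Array.py | finder_hash
-- ===== SOURCE A (Python) =====
-- import collections
--
-- def finder_hash(arr1, arr2):
--     d = collections.defaultdict(int)
--     for num in arr2:
--         d[num] += 1
--     for num in arr1:
--         if d[num] == 0:
--             return num
--         else:
--             d[num] -= 1
-- ===== SOURCE B (Python) =====
-- def finder_hash(arr1, arr2):
--     for i, num in enumerate(arr1):
--         if arr1[:i+1].count(num) > arr2.count(num):
--             return num
--     return None
-- ===== Notes on version B (the rewrite author's own statement) =====
-- stated objective: simpler
-- what changed: Replaces A's consumed multiset (build a defaultdict counter of arr2, then decrement it while scanning arr1) with a stateless characterization: return the first arr1[i] whose occurrence count in the prefix arr1[:i+1] exceeds its count in arr2, recomputing both counts per position; no counter or mutable state is maintained.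
import Mathlib
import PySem

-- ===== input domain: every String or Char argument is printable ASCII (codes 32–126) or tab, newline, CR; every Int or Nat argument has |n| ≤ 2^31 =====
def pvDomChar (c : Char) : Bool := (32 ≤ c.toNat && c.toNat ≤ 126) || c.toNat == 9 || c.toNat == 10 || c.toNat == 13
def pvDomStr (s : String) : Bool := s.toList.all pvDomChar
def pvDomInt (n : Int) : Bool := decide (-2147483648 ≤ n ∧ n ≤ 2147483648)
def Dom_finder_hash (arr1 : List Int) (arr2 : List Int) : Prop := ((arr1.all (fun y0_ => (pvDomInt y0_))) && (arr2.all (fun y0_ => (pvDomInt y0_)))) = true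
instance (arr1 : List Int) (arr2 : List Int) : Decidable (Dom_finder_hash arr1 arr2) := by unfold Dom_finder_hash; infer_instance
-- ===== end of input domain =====

-- B drops A's consumed counter entirely: it returns the first arr1[i] whose count in the
-- prefix arr1[:i+1] exceeds its count in arr2 (simpler, stateless; same return value).

-- ===== PORT A =====
-- 'd = defaultdict(int); for num in arr2: d[num] += 1' then
-- 'for num in arr1: if d[num] == 0: return num else: d[num] -= 1'
-- (defaultdict(int): a read of a missing key yields 0; the key insertion such a read
-- performs is unobservable here, so d[num] is ported as getD _ 0.)
def finderHashLoopA : PySem.Dict Int Int → List Int → Option Int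
  | _, [] => none
  | d, num :: rest =>
      if d.getD num 0 = 0 then some num
      else finderHashLoopA (d.modify num 0 (· - 1)) rest

def finder_hash (arr1 : List Int) (arr2 : List Int) : Option Int :=
  let d := arr2.foldl (fun d x => d.modify x 0 (· + 1)) PySem.Dict.empty
  finderHashLoopA d arr1

-- ===== PORT B =====
-- 'for i, num in enumerate(arr1): if arr1[:i+1].count(num) > arr2.count(num): return num'
def finderHashLoopB (arr1 arr2 : List Int) : List (Int × Int) → Option Int
  | [] => none
  | (i, num) :: rest =>
      if arr2.count num < (PySem.List.slice arr1 none (some (i + 1))).count num then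
        some num
      else finderHashLoopB arr1 arr2 rest

def finder_hash_alt (arr1 : List Int) (arr2 : List Int) : Option Int :=
  finderHashLoopB arr1 arr2 (PySem.List.enumerate arr1 0)

-- ===== PRECONDITION & SPEC =====
def Spec_finder_hash (arr1 : List Int) (arr2 : List Int) (out : Option Int) : Prop := out = finder_hash_alt arr1 arr2
instance (arr1 : List Int) (arr2 : List Int) (out : Option Int) : Decidable (Spec_finder_hash arr1 arr2 out) := by unfold Spec_finder_hash; infer_instance

-- ===== CLAIM (what is proved, stated in full; the proofs are below) =====
def Claim_equal_finder_hash : Prop := ∀ (arr1 : List Int) (arr2 : List Int), Dom_finder_hash arr1 arr2 → Spec_finder_hash arr1 arr2 (finder_hash arr1 arr2)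

-- ===== LEMMAS AND PROOFS =====

-- Invariant: arr1 = pre ++ l, the dict holds arr2's counts minus pre's counts (never
-- negative), and B's remaining enumerated suffix starts at index pre.length.
theorem finderHashLoop_eq (arr1 arr2 : List Int) :
    ∀ (l pre : List Int) (d : PySem.Dict Int Int),
      arr1 = pre ++ l →
      (∀ x, d.getD x 0 = (arr2.count x : Int) - (pre.count x : Int)) →
      (∀ x, pre.count x ≤ arr2.count x) →
      finderHashLoopA d l = finderHashLoopB arr1 arr2 (PySem.List.enumerate l (pre.length : Int)) := by
  intro l
  induction l with
  | nil => intro pre d _ _ _; simp [finderHashLoopA, finderHashLoopB, PySem.List.enumerate_nil]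
  | cons num rest ih =>
      intro pre d harr hinv hle
      rw [PySem.List.enumerate_cons]
      have hslice : PySem.List.slice arr1 none (some ((pre.length : Int) + 1))
          = pre ++ [num] := by
        have : ((pre.length : Int) + 1) = ((pre.length + 1 : Nat) : Int) := by push_cast; ring
        rw [this, PySem.List.slice_to_natCast, harr]
        simp [List.take_append]
      have hcnt : (PySem.List.slice arr1 none (some ((pre.length : Int) + 1))).count num
          = pre.count num + 1 := by
        rw [hslice]; simp [List.count_append]
      by_cases hz : d.getD num 0 = 0
      · have heq : arr2.count num = pre.count num := by
          have := hinv num; omega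
        have hcond : arr2.count num < (PySem.List.slice arr1 none (some ((pre.length : Int) + 1))).count num := by
          rw [hcnt]; omega
        simp [finderHashLoopA, finderHashLoopB, hz, hcond]
      · have hlt : pre.count num < arr2.count num := by
          have h1 := hinv num
          have h2 := hle num
          omega
        have hcond : ¬ arr2.count num < (PySem.List.slice arr1 none (some ((pre.length : Int) + 1))).count num := by
          rw [hcnt]; omega
        simp only [finderHashLoopA, finderHashLoopB, hz, hcond, if_false]
        have hrec := ih (pre ++ [num]) (d.modify num 0 (· - 1))
          (by simpa using harr)
          (by
            intro x
            rw [PySem.Dict.getD_modify]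
            by_cases hx : x = num
            · subst hx; rw [if_pos rfl, hinv x]; simp [List.count_append]; omega
            · rw [if_neg hx, hinv x]; simp [List.count_append, Ne.symm hx])
          (by
            intro x
            by_cases hx : x = num
            · subst hx; simp [List.count_append]; omega
            · simpa [List.count_append, List.count_singleton, Ne.symm hx] using hle x)
        rw [hrec]
        congr 2
        simp [List.length_append]

-- ===== VERDICT (by name: the statement is the Claim_ definition above) =====
theorem finder_hash_spec : Claim_equal_finder_hash := by
  intro arr1 arr2 _
  unfold Spec_finder_hash finder_hash finder_hash_alt
  have := finderHashLoop_eq arr1 arr2 arr1 [] (arr2.foldl (fun d x => d.modify x 0 (· + 1)) PySem.Dict.empty)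
    (by simp)
    (by intro x; rw [PySem.Dict.getD_foldl_modify_add_one, PySem.Dict.getD_empty]; simp)
    (by intro x; simp)
  simpa using this
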